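-- pv_equiv track=rewrite | github.com/David-Martino/drone-project | Software/GSC/ORB-SLAM/colcon_ws/src/cf3d_nav/cf3d_nav/explorer3d.py | bresenham3d
-- ===== SOURCE A (Python) =====
-- def bresenham3d(p0i, p1i):
--     """Integer 3D Bresenham line from p0i (i,j,k) to p1i (i,j,k)."""
--     (x0, y0, z0) = map(int, p0i)
--     (x1, y1, z1) = map(int, p1i)
--     dx = abs(x1 - x0); dy = abs(y1 - y0); dz = abs(z1 - z0)
--     sx = 1 if x1 >= x0 else -1
--     sy = 1 if y1 >= y0 else -1
--     sz = 1 if z1 >= z0 else -1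
--
--     if dx >= dy and dx >= dz:
--         p1 = 2 * dy - dx
--         p2 = 2 * dz - dx
--         while x0 != x1:
--             x0 += sx
--             if p1 >= 0: y0 += sy; p1 -= 2 * dx
--             if p2 >= 0: z0 += sz; p2 -= 2 * dx
--             p1 += 2 * dy; p2 += 2 * dz
--             yield (x0, y0, z0)
--     elif dy >= dx and dy >= dz:
--         p1 = 2 * dx - dy
--         p2 = 2 * dz - dy
--         while y0 != y1:
--             y0 += sy
--             if p1 >= 0: x0 += sx; p1 -= 2 * dy
--             if p2 >= 0: z0 += sz; p2 -= 2 * dy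
--             p1 += 2 * dx; p2 += 2 * dz
--             yield (x0, y0, z0)
--     else:
--         p1 = 2 * dy - dz
--         p2 = 2 * dx - dz
--         while z0 != z1:
--             z0 += sz
--             if p1 >= 0: y0 += sy; p1 -= 2 * dz
--             if p2 >= 0: x0 += sx; p2 -= 2 * dz
--             p1 += 2 * dy; p2 += 2 * dx
--             yield (x0, y0, z0)
-- ===== SOURCE B (Python) =====
-- def _bres_axis(du, dv, dw, u0, su, v0, sv, w0, sw, out):
--     # closed-form per-step: off-axis displacement i steps along the dominant
--     # axis is floor((2*d_off*i + du) / (2*du))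
--     for i in range(1, du + 1):
--         yield out(u0 + su * i,
--                   v0 + sv * ((2 * dv * i + du) // (2 * du)),
--                   w0 + sw * ((2 * dw * i + du) // (2 * du)))
--
-- def bresenham3d(p0i, p1i):
--     (x0, y0, z0) = map(int, p0i)
--     (x1, y1, z1) = map(int, p1i)
--     dx = abs(x1 - x0); dy = abs(y1 - y0); dz = abs(z1 - z0)
--     sx = 1 if x1 >= x0 else -1
--     sy = 1 if y1 >= y0 else -1
--     sz = 1 if z1 >= z0 else -1
--     if dx >= dy and dx >= dz:
--         return _bres_axis(dx, dy, dz, x0, sx, y0, sy, z0, sz, lambda u, v, w: (u, v, w))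
--     elif dy >= dx and dy >= dz:
--         return _bres_axis(dy, dx, dz, y0, sy, x0, sx, z0, sz, lambda u, v, w: (v, u, w))
--     else:
--         return _bres_axis(dz, dy, dx, z0, sz, y0, sy, x0, sx, lambda u, v, w: (w, v, u))
-- ===== Notes on version B (the rewrite author's own statement) =====
-- stated objective: alternative
-- what changed: Replaces A's stateful incremental error-term (p1/p2) Bresenham recurrence by a stateless per-step closed form: after i steps along the dominant axis each off-axis displacement is floor((2*d_off*i + d_dom)/(2*d_dom)), computed directly per yielded point.
import Mathlib
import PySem

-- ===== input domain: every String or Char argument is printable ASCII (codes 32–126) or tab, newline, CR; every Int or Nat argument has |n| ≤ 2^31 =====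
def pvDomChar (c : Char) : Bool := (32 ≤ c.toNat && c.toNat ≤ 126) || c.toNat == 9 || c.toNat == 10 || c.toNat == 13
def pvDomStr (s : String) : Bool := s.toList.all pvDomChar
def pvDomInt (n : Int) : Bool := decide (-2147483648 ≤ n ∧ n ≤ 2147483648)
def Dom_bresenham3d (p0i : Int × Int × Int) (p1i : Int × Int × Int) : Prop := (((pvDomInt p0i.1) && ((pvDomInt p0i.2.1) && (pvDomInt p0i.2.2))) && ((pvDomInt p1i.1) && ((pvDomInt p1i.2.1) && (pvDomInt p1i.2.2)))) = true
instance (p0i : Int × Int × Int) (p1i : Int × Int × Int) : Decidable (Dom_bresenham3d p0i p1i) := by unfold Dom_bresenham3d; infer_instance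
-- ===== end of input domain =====

-- B replaces A's incremental error-term (p1/p2) recurrence by a stateless per-step
-- closed form (off-axis offset = floor((2*d_off*i + du)/(2*du))); objective: alternative.

-- ===== PORT A =====
-- A's three while-loops are the same loop with the coordinate roles permuted:
-- bresLoopA is that loop (fuel = number of remaining steps, u the dominant
-- coordinate, v the p1-driven one, w the p2-driven one; `out` reassembles the
-- yielded (x, y, z) tuple from (u, v, w)).  Body order follows the Python body.
def bresLoopA (out : Int → Int → Int → Int × Int × Int)
    (fuel : Nat) (u u1 su v sv w sw du dv dw p1 p2 : Int) : List (Int × Int × Int) :=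
  match fuel with
  | 0 => []
  | fuel + 1 =>
    if u = u1 then []
    else
      out (u + su) (if 0 ≤ p1 then v + sv else v) (if 0 ≤ p2 then w + sw else w) ::
        bresLoopA out fuel (u + su) u1 su (if 0 ≤ p1 then v + sv else v) sv
          (if 0 ≤ p2 then w + sw else w) sw du dv dw
          ((if 0 ≤ p1 then p1 - 2 * du else p1) + 2 * dv)
          ((if 0 ≤ p2 then p2 - 2 * du else p2) + 2 * dw)

def bresenham3d (p0i : Int × Int × Int) (p1i : Int × Int × Int) : List (Int × Int × Int) :=
  let x0 := p0i.1; let y0 := p0i.2.1; let z0 := p0i.2.2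
  let x1 := p1i.1; let y1 := p1i.2.1; let z1 := p1i.2.2
  let dx := |x1 - x0|; let dy := |y1 - y0|; let dz := |z1 - z0|
  let sx : Int := if x1 ≥ x0 then 1 else -1
  let sy : Int := if y1 ≥ y0 then 1 else -1
  let sz : Int := if z1 ≥ z0 then 1 else -1
  if dx ≥ dy ∧ dx ≥ dz then
    bresLoopA (fun u v w => (u, v, w)) dx.toNat x0 x1 sx y0 sy z0 sz dx dy dz (2 * dy - dx) (2 * dz - dx)
  else if dy ≥ dx ∧ dy ≥ dz then
    bresLoopA (fun u v w => (v, u, w)) dy.toNat y0 y1 sy x0 sx z0 sz dy dx dz (2 * dx - dy) (2 * dz - dy)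
  else
    bresLoopA (fun u v w => (w, v, u)) dz.toNat z0 z1 sz y0 sy x0 sx dz dy dx (2 * dy - dz) (2 * dx - dz)

-- ===== PORT B =====
-- Source B's _bres_axis: for i in 1..du yield the per-step closed form directly.
def bresAxisB (out : Int → Int → Int → Int × Int × Int)
    (du dv dw u0 su v0 sv w0 sw : Int) : List (Int × Int × Int) :=
  (PySem.List.pyRange 1 (du + 1) 1).map fun i =>
    out (u0 + su * i)
        (v0 + sv * PySem.Int.floordiv (2 * dv * i + du) (2 * du))
        (w0 + sw * PySem.Int.floordiv (2 * dw * i + du) (2 * du))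

def bresenham3d_alt (p0i : Int × Int × Int) (p1i : Int × Int × Int) : List (Int × Int × Int) :=
  let x0 := p0i.1; let y0 := p0i.2.1; let z0 := p0i.2.2
  let x1 := p1i.1; let y1 := p1i.2.1; let z1 := p1i.2.2
  let dx := |x1 - x0|; let dy := |y1 - y0|; let dz := |z1 - z0|
  let sx : Int := if x1 ≥ x0 then 1 else -1
  let sy : Int := if y1 ≥ y0 then 1 else -1
  let sz : Int := if z1 ≥ z0 then 1 else -1
  if dx ≥ dy ∧ dx ≥ dz then
    bresAxisB (fun u v w => (u, v, w)) dx dy dz x0 sx y0 sy z0 sz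
  else if dy ≥ dx ∧ dy ≥ dz then
    bresAxisB (fun u v w => (v, u, w)) dy dx dz y0 sy x0 sx z0 sz
  else
    bresAxisB (fun u v w => (w, v, u)) dz dy dx z0 sz y0 sy x0 sx

-- ===== PRECONDITION & SPEC =====
def Spec_bresenham3d (p0i : Int × Int × Int) (p1i : Int × Int × Int) (out : List (Int × Int × Int)) : Prop := out = bresenham3d_alt p0i p1i
instance (p0i : Int × Int × Int) (p1i : Int × Int × Int) (out : List (Int × Int × Int)) : Decidable (Spec_bresenham3d p0i p1i out) := by unfold Spec_bresenham3d; infer_instance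

-- ===== CLAIM (what is proved, stated in full; the proofs are below) =====
def Claim_equal_bresenham3d : Prop := ∀ (p0i : Int × Int × Int) (p1i : Int × Int × Int), Dom_bresenham3d p0i p1i → Spec_bresenham3d p0i p1i (bresenham3d p0i p1i)

-- ===== LEMMAS AND PROOFS =====

-- the closed-form off-axis offset after i steps along the dominant axis
def pvY (dv du i : Int) : Int := PySem.Int.floordiv (2 * dv * i + du) (2 * du)

lemma pvY_zero (dv du : Int) (hdu : 0 < du) : pvY dv du 0 = 0 := by
  unfold pvY
  rw [PySem.Int.floordiv_eq_iff_of_pos (by omega)]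
  constructor <;> ring_nf <;> omega

lemma pvY_succ (du dv i : Int) (hdu : 0 < du) (h0 : 0 ≤ dv) (h1 : dv ≤ du) :
    pvY dv du (i + 1) =
      if 0 ≤ 2 * dv * (i + 1) - du - 2 * du * pvY dv du i then pvY dv du i + 1
      else pvY dv du i := by
  have h2 : (0 : Int) < 2 * du := by omega
  unfold pvY
  have hfm := PySem.Int.floordiv_mul_add_mod (2 * dv * i + du) (2 * du)
  have hm0 : 0 ≤ PySem.Int.mod (2 * dv * i + du) (2 * du) := by
    rw [PySem.Int.mod_eq_emod_of_pos h2]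
    exact Int.emod_nonneg _ (by omega)
  have hmlt : PySem.Int.mod (2 * dv * i + du) (2 * du) < 2 * du := by
    rw [PySem.Int.mod_eq_emod_of_pos h2]
    exact Int.emod_lt_of_pos _ h2
  set q := PySem.Int.floordiv (2 * dv * i + du) (2 * du) with hq
  set r := PySem.Int.mod (2 * dv * i + du) (2 * du) with hr
  split_ifs with h
  · rw [PySem.Int.floordiv_eq_iff_of_pos h2]
    constructor <;> nlinarith
  · rw [PySem.Int.floordiv_eq_iff_of_pos h2]
    constructor <;> nlinarith

lemma loop_eq (out : Int → Int → Int → Int × Int × Int)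
    (du dv dw su u0 v0 w0 sv sw : Int)
    (hdu : 0 < du) (hdv0 : 0 ≤ dv) (hdv1 : dv ≤ du) (hdw0 : 0 ≤ dw) (hdw1 : dw ≤ du)
    (hsu : su = 1 ∨ su = -1) :
    ∀ (k : Nat) (i : Int), 0 ≤ i → i + (k : Int) = du →
    bresLoopA out k (u0 + su * i) (u0 + su * du) su (v0 + sv * pvY dv du i) sv
        (w0 + sw * pvY dw du i) sw du dv dw
        (2 * dv * (i + 1) - du - 2 * du * pvY dv du i)
        (2 * dw * (i + 1) - du - 2 * du * pvY dw du i)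
      = (PySem.List.pyRange (i + 1) (du + 1) 1).map
          (fun j => out (u0 + su * j) (v0 + sv * pvY dv du j) (w0 + sw * pvY dw du j)) := by
  intro k
  induction k with
  | zero =>
    intro i hi0 hik
    have hieq : i = du := by push_cast at hik; omega
    subst hieq
    simp [bresLoopA, PySem.List.pyRange_one_eq_nil (by omega : du + 1 ≤ du + 1)]
  | succ k ih =>
    intro i hi0 hik
    push_cast at hik
    have hilt : i < du := by omega
    have hne : u0 + su * i ≠ u0 + su * du := by
      rcases hsu with h | h <;> subst h <;> intro hc <;> omega
    have hYv := pvY_succ du dv i hdu hdv0 hdv1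
    have hYw := pvY_succ du dw i hdu hdw0 hdw1
    have hih := ih (i + 1) (by omega) (by omega)
    have eu : u0 + su * i + su = u0 + su * (i + 1) := by ring
    simp only [bresLoopA]
    rw [if_neg hne,
      PySem.List.pyRange_one_cons (by omega : i + 1 < du + 1), List.map_cons]
    by_cases hv : 0 ≤ 2 * dv * (i + 1) - du - 2 * du * pvY dv du i <;>
      by_cases hw : 0 ≤ 2 * dw * (i + 1) - du - 2 * du * pvY dw du i
    · rw [if_pos hv] at hYv
      rw [if_pos hw] at hYw
      simp only [hv, hw, if_pos]
      rw [eu,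
        show v0 + sv * pvY dv du i + sv = v0 + sv * pvY dv du (i + 1) by rw [hYv]; ring,
        show w0 + sw * pvY dw du i + sw = w0 + sw * pvY dw du (i + 1) by rw [hYw]; ring,
        show 2 * dv * (i + 1) - du - 2 * du * pvY dv du i - 2 * du + 2 * dv
            = 2 * dv * (i + 1 + 1) - du - 2 * du * pvY dv du (i + 1) by rw [hYv]; ring,
        show 2 * dw * (i + 1) - du - 2 * du * pvY dw du i - 2 * du + 2 * dw
            = 2 * dw * (i + 1 + 1) - du - 2 * du * pvY dw du (i + 1) by rw [hYw]; ring,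
        hih]
    · rw [if_pos hv] at hYv
      rw [if_neg hw] at hYw
      simp only [hv, hw, ite_false, if_pos]
      rw [eu,
        show v0 + sv * pvY dv du i + sv = v0 + sv * pvY dv du (i + 1) by rw [hYv]; ring,
        show w0 + sw * pvY dw du i = w0 + sw * pvY dw du (i + 1) by rw [hYw],
        show 2 * dv * (i + 1) - du - 2 * du * pvY dv du i - 2 * du + 2 * dv
            = 2 * dv * (i + 1 + 1) - du - 2 * du * pvY dv du (i + 1) by rw [hYv]; ring,
        show 2 * dw * (i + 1) - du - 2 * du * pvY dw du i + 2 * dw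
            = 2 * dw * (i + 1 + 1) - du - 2 * du * pvY dw du (i + 1) by rw [hYw]; ring,
        hih]
    · rw [if_neg hv] at hYv
      rw [if_pos hw] at hYw
      simp only [hv, hw, ite_false, if_pos]
      rw [eu,
        show v0 + sv * pvY dv du i = v0 + sv * pvY dv du (i + 1) by rw [hYv],
        show w0 + sw * pvY dw du i + sw = w0 + sw * pvY dw du (i + 1) by rw [hYw]; ring,
        show 2 * dv * (i + 1) - du - 2 * du * pvY dv du i + 2 * dv
            = 2 * dv * (i + 1 + 1) - du - 2 * du * pvY dv du (i + 1) by rw [hYv]; ring,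
        show 2 * dw * (i + 1) - du - 2 * du * pvY dw du i - 2 * du + 2 * dw
            = 2 * dw * (i + 1 + 1) - du - 2 * du * pvY dw du (i + 1) by rw [hYw]; ring,
        hih]
    · rw [if_neg hv] at hYv
      rw [if_neg hw] at hYw
      simp only [hv, hw, ite_false]
      rw [eu,
        show v0 + sv * pvY dv du i = v0 + sv * pvY dv du (i + 1) by rw [hYv],
        show w0 + sw * pvY dw du i = w0 + sw * pvY dw du (i + 1) by rw [hYw],
        show 2 * dv * (i + 1) - du - 2 * du * pvY dv du i + 2 * dv
            = 2 * dv * (i + 1 + 1) - du - 2 * du * pvY dv du (i + 1) by rw [hYv]; ring,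
        show 2 * dw * (i + 1) - du - 2 * du * pvY dw du i + 2 * dw
            = 2 * dw * (i + 1 + 1) - du - 2 * du * pvY dw du (i + 1) by rw [hYw]; ring,
        hih]

lemma axis_eq (out : Int → Int → Int → Int × Int × Int)
    (du dv dw u0 su v0 sv w0 sw u1 : Int)
    (hdu0 : 0 ≤ du) (hdv0 : 0 ≤ dv) (hdv1 : dv ≤ du) (hdw0 : 0 ≤ dw) (hdw1 : dw ≤ du)
    (hsu : su = 1 ∨ su = -1) (hu1 : u1 = u0 + su * du) :
    bresLoopA out du.toNat u0 u1 su v0 sv w0 sw du dv dw (2 * dv - du) (2 * dw - du)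
      = bresAxisB out du dv dw u0 su v0 sv w0 sw := by
  rcases eq_or_lt_of_le hdu0 with h0 | hdu
  · have h0' : du = 0 := h0.symm
    subst h0'
    simp [bresLoopA, bresAxisB]
  · have h := loop_eq out du dv dw su u0 v0 w0 sv sw hdu hdv0 hdv1 hdw0 hdw1 hsu du.toNat 0
      le_rfl (by omega)
    rw [pvY_zero dv du hdu, pvY_zero dw du hdu] at h
    simp only [mul_zero, add_zero, zero_add, mul_one, sub_zero] at h
    unfold pvY at h
    rw [hu1, bresAxisB]
    exact h

lemma bres_core (p0i p1i : Int × Int × Int) :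
    bresenham3d p0i p1i = bresenham3d_alt p0i p1i := by
  obtain ⟨x0, y0, z0⟩ := p0i
  obtain ⟨x1, y1, z1⟩ := p1i
  simp only [bresenham3d, bresenham3d_alt]
  set sx := (if x1 ≥ x0 then (1:Int) else -1) with hsxd
  set sy := (if y1 ≥ y0 then (1:Int) else -1) with hsyd
  set sz := (if z1 ≥ z0 then (1:Int) else -1) with hszd
  set dx := |x1 - x0| with hdxd
  set dy := |y1 - y0| with hdyd
  set dz := |z1 - z0| with hdzd
  have hdx0 : 0 ≤ dx := hdxd ▸ abs_nonneg _
  have hdy0 : 0 ≤ dy := hdyd ▸ abs_nonneg _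
  have hdz0 : 0 ≤ dz := hdzd ▸ abs_nonneg _
  have hsx : sx = 1 ∨ sx = -1 := by rw [hsxd]; split_ifs <;> simp
  have hsy : sy = 1 ∨ sy = -1 := by rw [hsyd]; split_ifs <;> simp
  have hsz : sz = 1 ∨ sz = -1 := by rw [hszd]; split_ifs <;> simp
  have hx1 : x1 = x0 + sx * dx := by
    rw [hsxd, hdxd]; by_cases h : x1 ≥ x0
    · rw [if_pos h, abs_of_nonneg (by omega : (0:Int) ≤ x1 - x0)]; ring
    · rw [if_neg h, abs_of_neg (by omega : x1 - x0 < 0)]; ring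
  have hy1 : y1 = y0 + sy * dy := by
    rw [hsyd, hdyd]; by_cases h : y1 ≥ y0
    · rw [if_pos h, abs_of_nonneg (by omega : (0:Int) ≤ y1 - y0)]; ring
    · rw [if_neg h, abs_of_neg (by omega : y1 - y0 < 0)]; ring
  have hz1 : z1 = z0 + sz * dz := by
    rw [hszd, hdzd]; by_cases h : z1 ≥ z0
    · rw [if_pos h, abs_of_nonneg (by omega : (0:Int) ≤ z1 - z0)]; ring
    · rw [if_neg h, abs_of_neg (by omega : z1 - z0 < 0)]; ring
  clear_value sx sy sz dx dy dz
  split_ifs with h1 h2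
  · exact axis_eq _ _ _ _ _ _ _ _ _ _ _ hdx0 hdy0 h1.1 hdz0 h1.2 hsx hx1
  · exact axis_eq _ _ _ _ _ _ _ _ _ _ _ hdy0 hdx0 h2.1 hdz0 h2.2 hsy hy1
  · have h1' := not_and_or.mp h1
    have h2' := not_and_or.mp h2
    simp only [not_le, ge_iff_le] at h1' h2'
    exact axis_eq _ _ _ _ _ _ _ _ _ _ _ hdz0 hdy0 (by omega) hdx0 (by omega) hsz hz1

-- ===== VERDICT (by name: the statement is the Claim_ definition above) =====
theorem bresenham3d_spec : Claim_equal_bresenham3d := by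
  intro p0i p1i _
  unfold Spec_bresenham3d
  exact bres_core p0i p1i
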